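-- pv_equiv track=rewrite | github.com/marimo-team/marimo | marimo/_cli/convert/markdown.py | formatted_code_block
-- ===== SOURCE A (Python) =====
-- from typing import Any, Callable, Literal, Optional, Union
--
-- def formatted_code_block(
--     code: str, attributes: Optional[dict[str, str]] = None
-- ) -> str:
--     """Wraps code in a fenced code block with marimo attributes."""
--     if attributes is None:
--         attributes = {}
--     attribute_str = " ".join(
--         [""] + [f'{key}="{value}"' for key, value in attributes.items()]
--     )
--     guard = "```"
--     while guard in code:
--         guard += "`"
--     return "\n".join(
--         [f"""{guard}{{.python.marimo{attribute_str}}}""", code, guard, ""]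
--     )
-- ===== SOURCE B (Python) =====
-- from typing import Optional
--
--
-- def formatted_code_block(
--     code: str, attributes: Optional[dict[str, str]] = None
-- ) -> str:
--     """Wraps code in a fenced code block with marimo attributes."""
--     parts = []
--     if attributes:
--         for key, value in attributes.items():
--             parts.append(f' {key}="{value}"')
--     attribute_str = "".join(parts)
--     # One linear scan: longest run of consecutive backticks in code.
--     cur = best = 0
--     for ch in code:
--         cur = cur + 1 if ch == "`" else 0
--         if cur > best:
--             best = cur
--     guard = "`" * max(3, best + 1)
--     return f"{guard}{{.python.marimo{attribute_str}}}\n{code}\n{guard}\n"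
-- ===== Notes on version B (the rewrite author's own statement) =====
-- stated objective: alternative
-- what changed: A grows the fence guard by repeated substring membership tests; B makes one linear scan over code computing the longest consecutive-backtick run L and sets the guard length to max(3, L+1) directly, assembling the result by direct f-string concatenation instead of two joins over lists.
import Mathlib
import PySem

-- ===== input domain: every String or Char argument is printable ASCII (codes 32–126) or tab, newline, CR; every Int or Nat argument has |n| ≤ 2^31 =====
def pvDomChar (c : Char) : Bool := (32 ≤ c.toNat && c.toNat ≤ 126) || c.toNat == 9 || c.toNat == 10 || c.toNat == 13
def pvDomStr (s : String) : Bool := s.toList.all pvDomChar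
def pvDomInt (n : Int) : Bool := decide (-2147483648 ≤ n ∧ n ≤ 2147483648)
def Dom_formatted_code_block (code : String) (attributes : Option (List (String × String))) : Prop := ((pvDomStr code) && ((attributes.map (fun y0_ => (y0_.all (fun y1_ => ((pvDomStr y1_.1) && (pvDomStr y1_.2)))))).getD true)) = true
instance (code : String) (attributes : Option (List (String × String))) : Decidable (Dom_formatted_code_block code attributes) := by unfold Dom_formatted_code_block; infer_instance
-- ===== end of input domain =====

-- B replaces A's growing-guard substring-search loop by one linear scan for the longest
-- backtick run (guard = '`' * max(3, L+1)) and assembles the output by direct concatenation.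


-- ===== PORT A =====
-- 'while guard in code: guard += "`"'; terminates because an infix is no longer than code
def pvGuardLoop (code : List Char) (guard : List Char) : List Char :=
  if h : PySem.Chars.isIn guard code then pvGuardLoop code (guard ++ ['`']) else guard
termination_by code.length + 1 - guard.length
decreasing_by
  have hle : guard.length ≤ code.length :=
    List.IsInfix.length_le ((PySem.Chars.isIn_iff_infix guard code).1 h)
  simp only [List.length_append, List.length_cons, List.length_nil]
  omega

def formatted_code_block (code : String) (attributes : Option (List (String × String))) : String :=
  let attrs := attributes.getD []
  let attribute_str :=
    PySem.Str.join " " ("" :: attrs.map (fun kv => kv.1 ++ "=\"" ++ kv.2 ++ "\""))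
  let guard := String.ofList (pvGuardLoop code.toList ['`', '`', '`'])
  PySem.Str.join "\n"
    [guard ++ "{.python.marimo" ++ attribute_str ++ "}", code, guard, ""]

-- ===== PORT B =====
-- one step of the linear scan: (current run, best run so far)
def pvMaxRunStep (st : Nat × Nat) (ch : Char) : Nat × Nat :=
  let cur := if ch = '`' then st.1 + 1 else 0
  (cur, if cur > st.2 then cur else st.2)

def formatted_code_block_alt (code : String) (attributes : Option (List (String × String))) : String :=
  let parts := (attributes.getD []).map (fun kv => " " ++ kv.1 ++ "=\"" ++ kv.2 ++ "\"")
  let attribute_str := PySem.Str.join "" parts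
  let best := (code.toList.foldl pvMaxRunStep (0, 0)).2
  let guard := String.ofList (List.replicate (max 3 (best + 1)) '`')
  guard ++ "{.python.marimo" ++ attribute_str ++ "}\n" ++ code ++ "\n" ++ guard ++ "\n"

-- ===== PRECONDITION & SPEC =====
def Spec_formatted_code_block (code : String) (attributes : Option (List (String × String))) (out : String) : Prop := out = formatted_code_block_alt code attributes
instance (code : String) (attributes : Option (List (String × String))) (out : String) : Decidable (Spec_formatted_code_block code attributes out) := by unfold Spec_formatted_code_block; infer_instance

-- ===== CLAIM (what is proved, stated in full; the proofs are below) =====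
def Claim_equal_formatted_code_block : Prop := ∀ (code : String) (attributes : Option (List (String × String))), Dom_formatted_code_block code attributes → Spec_formatted_code_block code attributes (formatted_code_block code attributes)

-- ===== LEMMAS AND PROOFS =====

-- length of the leading backtick run
def pvHR : List Char → Nat
  | [] => 0
  | c :: t => if c = '`' then pvHR t + 1 else 0

-- length of the longest backtick run
def pvMR : List Char → Nat
  | [] => 0
  | c :: t => if c = '`' then max (pvHR t + 1) (pvMR t) else pvMR t

theorem pvHR_le_pvMR (l : List Char) : pvHR l ≤ pvMR l := by
  induction l with
  | nil => simp [pvHR, pvMR]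
  | cons c t ih =>
    by_cases h : c = '`' <;> simp [pvHR, pvMR, h] <;> omega

theorem pvMR_cons (c : Char) (t : List Char) :
    pvMR (c :: t) = max (pvHR (c :: t)) (pvMR t) := by
  by_cases h : c = '`' <;> simp [pvHR, pvMR, h]

theorem replicate_prefix_iff (l : List Char) :
    ∀ k, List.replicate k '`' <+: l ↔ k ≤ pvHR l := by
  induction l with
  | nil =>
    intro k; cases k with
    | zero => simp
    | succ n => simp [List.replicate_succ, pvHR]
  | cons c t ih =>
    intro k; cases k with
    | zero => simp
    | succ n =>
      simp only [List.replicate_succ, List.cons_prefix_cons]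
      by_cases h : c = '`'
      · simp [pvHR, h, ih n]
      · simp [pvHR, h]
        intro hc; exact absurd hc.symm h

theorem replicate_infix_iff (l : List Char) :
    ∀ k, List.replicate k '`' <:+: l ↔ k ≤ pvMR l := by
  induction l with
  | nil =>
    intro k; cases k with
    | zero => simp
    | succ n => simp [List.replicate_succ, pvMR]
  | cons c t ih =>
    intro k
    rw [List.infix_cons_iff, replicate_prefix_iff, ih, pvMR_cons]
    omega

theorem foldl_maxRunStep (l : List Char) :
    ∀ cur best, cur ≤ best →
      (l.foldl pvMaxRunStep (cur, best)).2 = max best (max (cur + pvHR l) (pvMR l)) := by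
  induction l with
  | nil => intro cur best h; simp [pvHR, pvMR]; omega
  | cons c t ih =>
    intro cur best h
    by_cases hc : c = '`'
    · subst hc
      have h1 : pvMaxRunStep (cur, best) '`' = (cur + 1, max best (cur + 1)) := by
        simp [pvMaxRunStep]
        split_ifs <;> omega
      rw [List.foldl_cons, h1, ih (cur + 1) (max best (cur + 1)) (by omega)]
      simp [pvHR, pvMR]
      omega
    · have h1 : pvMaxRunStep (cur, best) c = (0, best) := by
        simp [pvMaxRunStep, hc]
      rw [List.foldl_cons, h1, ih 0 best (by omega)]
      have hmr := pvHR_le_pvMR t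
      simp [pvHR, pvMR, hc]
      omega

theorem foldl_maxRunStep_zero (l : List Char) :
    (l.foldl pvMaxRunStep (0, 0)).2 = pvMR l := by
  have := foldl_maxRunStep l 0 0 (le_refl _)
  have := pvHR_le_pvMR l
  omega

theorem pvGuardLoop_replicate (l : List Char) :
    ∀ d k, 1 ≤ k → pvMR l + 1 ≤ k + d →
      pvGuardLoop l (List.replicate k '`') = List.replicate (max k (pvMR l + 1)) '`' := by
  intro d
  induction d with
  | zero =>
    intro k hk hd
    rw [pvGuardLoop]
    have : ¬ (PySem.Chars.isIn (List.replicate k '`') l = true) := by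
      rw [PySem.Chars.isIn_iff_infix, replicate_infix_iff]; omega
    rw [dif_neg this]
    congr 1; omega
  | succ d ih =>
    intro k hk hd
    rw [pvGuardLoop]
    by_cases h : PySem.Chars.isIn (List.replicate k '`') l = true
    · rw [dif_pos h]
      have hle : k ≤ pvMR l := by
        rw [PySem.Chars.isIn_iff_infix, replicate_infix_iff] at h; omega
      rw [← List.replicate_succ', ih (k + 1) (by omega) (by omega)]
      congr 1; omega
    · rw [dif_neg h]
      have : ¬ k ≤ pvMR l := by
        rw [PySem.Chars.isIn_iff_infix, replicate_infix_iff] at h; omega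
      congr 1; omega

theorem pvGuardLoop_three (l : List Char) :
    pvGuardLoop l ['`', '`', '`'] = List.replicate (max 3 (pvMR l + 1)) '`' := by
  have := pvGuardLoop_replicate l (pvMR l) 3 (by omega) (by omega)
  simpa using this

-- the two ways of building the attribute string agree
theorem join_sep_cons_nil (sep : List Char) :
    ∀ (parts : List (List Char)) (x : List Char),
      PySem.Chars.join sep (x :: parts) = x ++ PySem.Chars.join [] (parts.map (sep ++ ·)) := by
  intro parts
  induction parts with
  | nil => intro x; simp [PySem.Chars.join_singleton, PySem.Chars.join_nil]
  | cons p ps ih =>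
    intro x
    rw [PySem.Chars.join_cons_cons, ih p]
    simp only [List.map_cons]
    cases hps : ps.map (sep ++ ·) with
    | nil => simp [PySem.Chars.join_singleton, List.append_assoc]
    | cons q qs =>
      rw [PySem.Chars.join_cons_cons]
      simp [List.append_assoc]

-- ===== VERDICT (by name: the statement is the Claim_ definition above) =====
theorem formatted_code_block_spec : Claim_equal_formatted_code_block := by
  intro code attributes _
  unfold Spec_formatted_code_block formatted_code_block formatted_code_block_alt
  rw [← String.toList_inj]
  simp only [PySem.Str.toList_join, List.map_cons, List.map_map, List.map_nil,
    String.toList_append, foldl_maxRunStep_zero, pvGuardLoop_three]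
  simp only [PySem.Chars.join_cons_cons, PySem.Chars.join_singleton]
  rw [join_sep_cons_nil]
  have hmap : (List.map ((" ".toList ++ ·) ∘ (String.toList ∘ fun kv : String × String =>
        kv.1 ++ "=\"" ++ kv.2 ++ "\"")) (attributes.getD [])) =
      (List.map (String.toList ∘ fun kv : String × String =>
        " " ++ kv.1 ++ "=\"" ++ kv.2 ++ "\"") (attributes.getD [])) := by
    apply List.map_congr_left
    intro kv _
    simp [String.toList_append, List.append_assoc]
  rw [List.map_map, hmap]
  have e1 : ("}\n" : String).toList = ("}" : String).toList ++ ("\n" : String).toList := by decide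
  simp [e1, List.append_assoc]
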